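-- pv_equiv track=rewrite | github.com/loonghao/auroraview | scripts/harness_changed.py | build_command_plan
-- ===== SOURCE A (Python) =====
-- from typing import Dict, Iterable, List, Optional
--
-- CI_FILES = {
--     "Cargo.lock",
--     "Cargo.toml",
--     "justfile",
--     "noxfile.py",
--     "pyproject.toml",
--     "vx.toml",
--     ".config/nextest.toml",
-- }
--
-- def classify_changes(paths: Iterable[str]) -> Dict[str, bool]:
--     flags = {
--         "ci": False,
--         "rust": False,
--         "python_unit": False,
--         "python_integration": False,
--         "sdk": False,
--         "mcp": False,
--         "assets": False,
--         "gallery": False,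
--         "docs": False,
--     }
--
--     for path in paths:
--         if path in CI_FILES or path.startswith(".github/"):
--             flags["ci"] = True
--         if (
--             path.endswith(".rs")
--             or path.startswith("src/")
--             or path.startswith("crates/")
--             or path.startswith("benches/")
--             or path.startswith("tests/rust/")
--             or path == ".config/nextest.toml"
--         ):
--             flags["rust"] = True
--         if path.startswith("python/") or path.startswith("tests/python/unit/"):
--             flags["python_unit"] = True
--         if path.startswith("python/") or path.startswith("tests/python/integration/"):
--             flags["python_integration"] = True
--         if path.startswith("packages/auroraview-sdk/"):
--             flags["sdk"] = True
--         if path.startswith("packages/auroraview-mcp/") or path == ".github/workflows/mcp-ci.yml":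
--             flags["mcp"] = True
--         if path.startswith("crates/auroraview-assets/frontend/"):
--             flags["assets"] = True
--         if path.startswith("gallery/"):
--             flags["gallery"] = True
--         if path.startswith("docs/") or path.endswith(".md"):
--             flags["docs"] = True
--
--     return flags
--
-- def build_command_plan(paths: Iterable[str]) -> List[str]:
--     path_list = list(paths)
--     if not path_list:
--         return ["vx just harness-quick"]
--
--     flags = classify_changes(path_list)
--     commands: List[str] = []
--
--     if flags["ci"]:
--         commands.append("vx just harness-verify")
--     else:
--         if flags["rust"]:
--             commands.append("vx just test-rust-fast")
--         if flags["python_unit"]: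
--             commands.append("vx just test-python-unit-fast")
--         if flags["python_integration"]:
--             commands.append("vx just test-python-integration")
--
--     if flags["assets"]:
--         commands.append("vx just assets-ci")
--     if flags["sdk"]:
--         commands.append("vx just sdk-ci")
--     if flags["mcp"]:
--         commands.append("vx just mcp-verify")
--     if flags["gallery"]:
--         commands.append("vx just gallery-verify")
--     if flags["docs"] and not commands:
--         commands.append("vx just ci-docs-build")
--     if not commands:
--         commands.append("vx just harness-quick")
--
--     unique_commands: List[str] = []
--     for command in commands:
--         if command not in unique_commands:
--             unique_commands.append(command)
--     return unique_commands
-- ===== SOURCE B (Python) =====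
-- from typing import Iterable, List
--
-- CI_FILES = {
--     "Cargo.lock",
--     "Cargo.toml",
--     "justfile",
--     "noxfile.py",
--     "pyproject.toml",
--     "vx.toml",
--     ".config/nextest.toml",
-- }
--
--
-- def build_command_plan(paths: Iterable[str]) -> List[str]:
--     path_list = list(paths)
--     if not path_list:
--         return ["vx just harness-quick"]
--
--     # nine independent scans, one per category
--     ci = any(p in CI_FILES or p.startswith(".github/") for p in path_list)
--     rust = any(
--         p.endswith(".rs")
--         or p.startswith(("src/", "crates/", "benches/", "tests/rust/"))
--         or p == ".config/nextest.toml"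
--         for p in path_list
--     )
--     py_unit = any(p.startswith(("python/", "tests/python/unit/")) for p in path_list)
--     py_int = any(p.startswith(("python/", "tests/python/integration/")) for p in path_list)
--     sdk = any(p.startswith("packages/auroraview-sdk/") for p in path_list)
--     mcp = any(
--         p.startswith("packages/auroraview-mcp/") or p == ".github/workflows/mcp-ci.yml"
--         for p in path_list
--     )
--     assets = any(p.startswith("crates/auroraview-assets/frontend/") for p in path_list)
--     gallery = any(p.startswith("gallery/") for p in path_list)
--     docs = any(p.startswith("docs/") or p.endswith(".md") for p in path_list)
--
--     core = (
--         ["vx just harness-verify"]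
--         if ci
--         else [
--             c
--             for c, f in [
--                 ("vx just test-rust-fast", rust),
--                 ("vx just test-python-unit-fast", py_unit),
--                 ("vx just test-python-integration", py_int),
--             ]
--             if f
--         ]
--     )
--     extras = [
--         c
--         for c, f in [
--             ("vx just assets-ci", assets),
--             ("vx just sdk-ci", sdk),
--             ("vx just mcp-verify", mcp),
--             ("vx just gallery-verify", gallery),
--         ]
--         if f
--     ]
--     cmds = core + extras
--     if not cmds:
--         cmds = ["vx just ci-docs-build"] if docs else ["vx just harness-quick"]
--     return cmds
-- ===== Notes on version B (the rewrite author's own statement) =====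
-- stated objective: alternative
-- what changed: B replaces the single pass that threads nine mutable flags through one loop with nine independent any()-scans (one per category) and builds the command list declaratively by filtering literal (command, flag) tables, making the explicit append-then-dedup pass of A unnecessary since each command can appear at most once.
import Mathlib
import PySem

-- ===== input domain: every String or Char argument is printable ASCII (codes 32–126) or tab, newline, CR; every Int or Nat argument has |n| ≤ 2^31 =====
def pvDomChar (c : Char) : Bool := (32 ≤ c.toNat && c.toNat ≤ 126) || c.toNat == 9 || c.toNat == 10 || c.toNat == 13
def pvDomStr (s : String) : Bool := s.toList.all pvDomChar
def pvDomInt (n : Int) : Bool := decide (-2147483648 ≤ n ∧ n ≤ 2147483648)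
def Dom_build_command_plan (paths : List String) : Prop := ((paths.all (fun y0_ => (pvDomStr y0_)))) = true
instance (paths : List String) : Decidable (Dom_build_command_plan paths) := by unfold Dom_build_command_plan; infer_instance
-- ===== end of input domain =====

-- B computes the nine category flags with nine independent scans and builds the
-- command list by filtering literal tables (no dedup pass needed); alternative
-- decomposition, not claimed faster.


-- ===== PORT A =====
def ciFiles : List String :=
  ["Cargo.lock", "Cargo.toml", "justfile", "noxfile.py", "pyproject.toml", "vx.toml",
   ".config/nextest.toml"]

-- branch conditions of classify_changes, named for reuse in the fold
def pCi (p : String) : Bool := ciFiles.contains p || PySem.Str.startswith p ".github/"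
def pRust (p : String) : Bool :=
  PySem.Str.endswith p ".rs" || PySem.Str.startswith p "src/" ||
  PySem.Str.startswith p "crates/" || PySem.Str.startswith p "benches/" ||
  PySem.Str.startswith p "tests/rust/" || p == ".config/nextest.toml"
def pPyUnit (p : String) : Bool :=
  PySem.Str.startswith p "python/" || PySem.Str.startswith p "tests/python/unit/"
def pPyInt (p : String) : Bool :=
  PySem.Str.startswith p "python/" || PySem.Str.startswith p "tests/python/integration/"
def pSdk (p : String) : Bool := PySem.Str.startswith p "packages/auroraview-sdk/"
def pMcp (p : String) : Bool :=
  PySem.Str.startswith p "packages/auroraview-mcp/" || p == ".github/workflows/mcp-ci.yml"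
def pAssets (p : String) : Bool := PySem.Str.startswith p "crates/auroraview-assets/frontend/"
def pGallery (p : String) : Bool := PySem.Str.startswith p "gallery/"
def pDocs (p : String) : Bool := PySem.Str.startswith p "docs/" || PySem.Str.endswith p ".md"

-- flags dict: (ci, rust, python_unit, python_integration, sdk, mcp, assets, gallery, docs)
abbrev Flags9 := Bool × Bool × Bool × Bool × Bool × Bool × Bool × Bool × Bool

-- one loop body of classify_changes: each `if cond: flags[k] = True`
def updFlags (f : Flags9) (p : String) : Flags9 :=
  (if pCi p then true else f.1,
   if pRust p then true else f.2.1,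
   if pPyUnit p then true else f.2.2.1,
   if pPyInt p then true else f.2.2.2.1,
   if pSdk p then true else f.2.2.2.2.1,
   if pMcp p then true else f.2.2.2.2.2.1,
   if pAssets p then true else f.2.2.2.2.2.2.1,
   if pGallery p then true else f.2.2.2.2.2.2.2.1,
   if pDocs p then true else f.2.2.2.2.2.2.2.2)

def classify_changes (paths : List String) : Flags9 :=
  paths.foldl updFlags (false, false, false, false, false, false, false, false, false)

-- command assembly + dedup pass of A, as a function of the flags dict
def assembleA (f : Flags9) : List String :=
  let c1 : List String :=
    if f.1 then ["vx just harness-verify"]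
    else
      (if f.2.1 then ["vx just test-rust-fast"] else []) ++
      (if f.2.2.1 then ["vx just test-python-unit-fast"] else []) ++
      (if f.2.2.2.1 then ["vx just test-python-integration"] else [])
  let c2 := c1 ++ (if f.2.2.2.2.2.2.1 then ["vx just assets-ci"] else [])
  let c3 := c2 ++ (if f.2.2.2.2.1 then ["vx just sdk-ci"] else [])
  let c4 := c3 ++ (if f.2.2.2.2.2.1 then ["vx just mcp-verify"] else [])
  let c5 := c4 ++ (if f.2.2.2.2.2.2.2.1 then ["vx just gallery-verify"] else [])
  let c6 := if f.2.2.2.2.2.2.2.2 && c5.isEmpty then c5 ++ ["vx just ci-docs-build"] else c5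
  let c7 := if c6.isEmpty then c6 ++ ["vx just harness-quick"] else c6
  c7.foldl (fun acc c => if acc.contains c then acc else acc ++ [c]) []

def build_command_plan (paths : List String) : List String :=
  if paths.isEmpty then ["vx just harness-quick"]
  else assembleA (classify_changes paths)

-- ===== PORT B =====
def ciFilesB : List String :=
  ["Cargo.lock", "Cargo.toml", "justfile", "noxfile.py", "pyproject.toml", "vx.toml",
   ".config/nextest.toml"]

-- B's declarative assembly from the nine flags (no dedup pass)
def assembleB (ci rust pyUnit pyInt sdk mcp assets gallery docs : Bool) : List String :=
  let core : List String :=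
    if ci then ["vx just harness-verify"]
    else
      (([("vx just test-rust-fast", rust),
         ("vx just test-python-unit-fast", pyUnit),
         ("vx just test-python-integration", pyInt)].filter (·.2)).map (·.1))
  let extras : List String :=
    ([("vx just assets-ci", assets),
      ("vx just sdk-ci", sdk),
      ("vx just mcp-verify", mcp),
      ("vx just gallery-verify", gallery)].filter (·.2)).map (·.1)
  let cmds := core ++ extras
  if cmds.isEmpty then (if docs then ["vx just ci-docs-build"] else ["vx just harness-quick"])
  else cmds

def build_command_plan_alt (paths : List String) : List String :=
  if paths.isEmpty then ["vx just harness-quick"]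
  else
    assembleB
      (paths.any fun p => ciFilesB.contains p || PySem.Str.startswith p ".github/")
      (paths.any fun p => PySem.Str.endswith p ".rs" ||
        (["src/", "crates/", "benches/", "tests/rust/"].any fun pre => PySem.Str.startswith p pre) ||
        p == ".config/nextest.toml")
      (paths.any fun p => ["python/", "tests/python/unit/"].any fun pre => PySem.Str.startswith p pre)
      (paths.any fun p => ["python/", "tests/python/integration/"].any fun pre => PySem.Str.startswith p pre)
      (paths.any fun p => PySem.Str.startswith p "packages/auroraview-sdk/")
      (paths.any fun p => PySem.Str.startswith p "packages/auroraview-mcp/" ||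
        p == ".github/workflows/mcp-ci.yml")
      (paths.any fun p => PySem.Str.startswith p "crates/auroraview-assets/frontend/")
      (paths.any fun p => PySem.Str.startswith p "gallery/")
      (paths.any fun p => PySem.Str.startswith p "docs/" || PySem.Str.endswith p ".md")

-- ===== PRECONDITION & SPEC =====
def Spec_build_command_plan (paths : List String) (out : List String) : Prop := out = build_command_plan_alt paths
instance (paths : List String) (out : List String) : Decidable (Spec_build_command_plan paths out) := by unfold Spec_build_command_plan; infer_instance

-- ===== CLAIM (what is proved, stated in full; the proofs are below) =====
def Claim_equal_build_command_plan : Prop := ∀ (paths : List String), Dom_build_command_plan paths → Spec_build_command_plan paths (build_command_plan paths)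

-- ===== LEMMAS AND PROOFS =====

lemma ite_true_or (c b : Bool) : (if c = true then true else b) = (c || b) := by
  cases c <;> simp

lemma classify_fold (paths : List String) : ∀ f : Flags9,
    List.foldl updFlags f paths =
      (f.1 || paths.any pCi, f.2.1 || paths.any pRust, f.2.2.1 || paths.any pPyUnit,
       f.2.2.2.1 || paths.any pPyInt, f.2.2.2.2.1 || paths.any pSdk,
       f.2.2.2.2.2.1 || paths.any pMcp, f.2.2.2.2.2.2.1 || paths.any pAssets,
       f.2.2.2.2.2.2.2.1 || paths.any pGallery, f.2.2.2.2.2.2.2.2 || paths.any pDocs) := by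
  induction paths with
  | nil => intro f; simp
  | cons p ps ih =>
    intro f
    simp only [List.foldl_cons, ih, updFlags, ite_true_or, List.any_cons]
    simp [Bool.or_assoc, Bool.or_left_comm]

lemma classify_eq (paths : List String) :
    classify_changes paths =
      (paths.any pCi, paths.any pRust, paths.any pPyUnit, paths.any pPyInt, paths.any pSdk,
       paths.any pMcp, paths.any pAssets, paths.any pGallery, paths.any pDocs) := by
  simpa using classify_fold paths (false, false, false, false, false, false, false, false, false)

lemma assemble_eq : ∀ ci rust pu pi sdk mcp assets gallery docs : Bool,
    assembleA (ci, rust, pu, pi, sdk, mcp, assets, gallery, docs) =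
      assembleB ci rust pu pi sdk mcp assets gallery docs := by
  decide

lemma pred_ci (p : String) :
    (ciFilesB.contains p || PySem.Str.startswith p ".github/") = pCi p := rfl

lemma pred_rust (p : String) :
    (PySem.Str.endswith p ".rs" ||
      (["src/", "crates/", "benches/", "tests/rust/"].any fun pre => PySem.Str.startswith p pre) ||
      p == ".config/nextest.toml") = pRust p := by
  simp [pRust, List.any, Bool.or_assoc]

lemma pred_pyUnit (p : String) :
    (["python/", "tests/python/unit/"].any fun pre => PySem.Str.startswith p pre) = pPyUnit p := by
  simp [pPyUnit, List.any]

lemma pred_pyInt (p : String) :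
    (["python/", "tests/python/integration/"].any fun pre => PySem.Str.startswith p pre)
      = pPyInt p := by
  simp [pPyInt, List.any]

-- ===== VERDICT (by name: the statement is the Claim_ definition above) =====
theorem build_command_plan_spec : Claim_equal_build_command_plan := by
  intro paths _
  unfold Spec_build_command_plan build_command_plan build_command_plan_alt
  by_cases h : paths.isEmpty
  · simp [h]
  · simp only [h, Bool.false_eq_true, if_false]
    rw [classify_eq]
    simp only [pred_ci, pred_rust, pred_pyUnit, pred_pyInt]
    exact assemble_eq _ _ _ _ _ _ _ _ _
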